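-- pv_equiv track=rewrite | github.com/yasufumi-nakata/Pytra | src/pylib/re.py | _is_dotted_ident
-- ===== SOURCE A (Python) =====
-- def _is_ident(s: str) -> bool:
--     if s == "":
--         return False
--     if not (s[0].isalpha() or s[0] == "_"):
--         return False
--     for ch in s[1:]:
--         if not (ch.isalnum() or ch == "_"):
--             return False
--     return True
--
-- def _is_dotted_ident(s: str) -> bool:
--     parts = s.split(".")
--     if len(parts) == 0:
--         return False
--     for p in parts:
--         if not _is_ident(p):
--             return False
--     return True
-- ===== SOURCE B (Python) =====
-- def _is_dotted_ident(s: str) -> bool: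
--     expecting_start = True
--     for ch in s:
--         if ch == '.':
--             if expecting_start:
--                 return False
--             expecting_start = True
--         elif expecting_start:
--             if not (ch.isalpha() or ch == '_'):
--                 return False
--             expecting_start = False
--         else:
--             if not (ch.isalnum() or ch == '_'):
--                 return False
--     return not expecting_start
-- ===== Notes on version B (the rewrite author's own statement) =====
-- stated objective: simpler
-- what changed: Replaced split-on-dot plus a per-part identifier check by a single linear scan over the characters with one expecting_start flag and no intermediate list of parts.
import Mathlib
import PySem

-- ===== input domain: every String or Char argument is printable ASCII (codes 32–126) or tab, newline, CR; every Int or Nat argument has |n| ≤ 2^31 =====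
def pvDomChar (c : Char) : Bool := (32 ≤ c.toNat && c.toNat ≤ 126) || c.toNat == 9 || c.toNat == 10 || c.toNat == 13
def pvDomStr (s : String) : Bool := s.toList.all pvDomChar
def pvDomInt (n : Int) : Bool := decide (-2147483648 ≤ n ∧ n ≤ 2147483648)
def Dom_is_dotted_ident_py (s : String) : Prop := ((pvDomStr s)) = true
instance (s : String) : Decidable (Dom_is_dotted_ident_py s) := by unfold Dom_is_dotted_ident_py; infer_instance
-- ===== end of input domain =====

-- B replaces split-on-dot + per-part checks by one linear scan with an expecting_start flag (simpler; no part list).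

-- ===== PORT A =====
-- _is_ident: s == "" is the nil list; s[0] is the head, s[1:] the tail (exact for a nonempty list);
-- the for-loop with early `return False` is List.all.
def pv_is_ident (p : List Char) : Bool :=
  match p with
  | [] => false
  | c0 :: rest =>
    if !(PySem.Chars.isalpha c0 || c0 = '_') then false
    else rest.all (fun ch => PySem.Chars.isalnum ch || ch = '_')

def is_dotted_ident_py (s : String) : Bool :=
  let parts := PySem.Chars.splitOn s.toList ['.']   -- s.split(".")
  if parts.length = 0 then false
  else parts.all pv_is_ident                        -- for p in parts: if not _is_ident(p): return False

-- ===== PORT B =====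
-- the for-loop of Source B with its early returns, as structural recursion carrying expecting_start
def pv_scan (cs : List Char) (expecting_start : Bool) : Bool :=
  match cs with
  | [] => !expecting_start
  | ch :: rest =>
    if ch = '.' then
      if expecting_start then false else pv_scan rest true
    else if expecting_start then
      if !(PySem.Chars.isalpha ch || ch = '_') then false else pv_scan rest false
    else
      if !(PySem.Chars.isalnum ch || ch = '_') then false else pv_scan rest false

def is_dotted_ident_py_alt (s : String) : Bool := pv_scan s.toList true

-- ===== PRECONDITION & SPEC =====
def Spec_is_dotted_ident_py (s : String) (out : Bool) : Prop := out = is_dotted_ident_py_alt s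
instance (s : String) (out : Bool) : Decidable (Spec_is_dotted_ident_py s out) := by unfold Spec_is_dotted_ident_py; infer_instance

-- ===== CLAIM (what is proved, stated in full; the proofs are below) =====
def Claim_equal_is_dotted_ident_py : Prop := ∀ (s : String), Dom_is_dotted_ident_py s → Spec_is_dotted_ident_py s (is_dotted_ident_py s)

-- ===== LEMMAS AND PROOFS =====

-- reference split on '.' used to characterise PySem.Chars.splitOn
def pvSplit : List Char → List Char → List (List Char)
  | [], cur => [cur.reverse]
  | c :: rest, cur => if c = '.' then cur.reverse :: pvSplit rest [] else pvSplit rest (c :: cur)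

theorem pv_go_eq (l : List Char) : ∀ (fuel : Nat) (cur : List Char) (acc : List (List Char)),
    l.length < fuel →
    PySem.Chars.splitOn.go ['.'] fuel l cur acc = acc.reverse ++ pvSplit l cur := by
  induction l with
  | nil =>
    intro fuel cur acc h
    match fuel with
    | f + 1 => simp [PySem.Chars.splitOn.go, pvSplit]
  | cons c rest ih =>
    intro fuel cur acc h
    match fuel with
    | f + 1 =>
      by_cases hc : c = '.'
      · subst hc
        rw [show PySem.Chars.splitOn.go ['.'] (f+1) ('.'::rest) cur acc
              = PySem.Chars.splitOn.go ['.'] f (List.drop 1 ('.'::rest)) [] (cur.reverse :: acc) by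
              simp [PySem.Chars.splitOn.go, List.isPrefixOf]]
        simp only [List.drop_succ_cons, List.drop_zero]
        rw [ih f [] (cur.reverse :: acc) (by simpa using Nat.lt_of_succ_lt_succ h)]
        simp [pvSplit]
      · rw [show PySem.Chars.splitOn.go ['.'] (f+1) (c::rest) cur acc
              = PySem.Chars.splitOn.go ['.'] f rest (c :: cur) acc by
              simp [PySem.Chars.splitOn.go, List.isPrefixOf, Ne.symm hc]]
        rw [ih f (c :: cur) acc (by simpa using Nat.lt_of_succ_lt_succ h)]
        simp [pvSplit, hc]

theorem pv_splitOn_eq (cs : List Char) : PySem.Chars.splitOn cs ['.'] = pvSplit cs [] := by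
  show PySem.Chars.splitOn.go ['.'] (cs.length + 1) cs [] [] = pvSplit cs []
  rw [pv_go_eq cs (cs.length + 1) [] [] (Nat.lt_succ_self _)]
  simp

theorem pvSplit_ne_nil (cs cur : List Char) : pvSplit cs cur ≠ [] := by
  induction cs generalizing cur with
  | nil => simp [pvSplit]
  | cons c rest ih => by_cases hc : c = '.' <;> simp [pvSplit, hc, ih]

-- appending a character to a nonempty candidate part
theorem pv_ident_append (xs : List Char) (c : Char) (h : xs ≠ []) :
    pv_is_ident (xs ++ [c]) = (pv_is_ident xs && (PySem.Chars.isalnum c || c = '_')) := by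
  match xs, h with
  | x :: t, _ =>
    simp only [List.cons_append, pv_is_ident, List.all_append, List.all_cons, List.all_nil]
    by_cases hx : PySem.Chars.isalpha x || x = '_' <;> simp [hx]

-- the main invariant: the scan with flag `false` checks the remaining characters of the
-- current (so-far-valid, nonempty) part and all later parts; with flag `true` it checks a fresh part list
theorem pv_main (cs : List Char) :
    (pv_scan cs true = (pvSplit cs []).all pv_is_ident) ∧
    (∀ cur : List Char, cur ≠ [] → pv_is_ident cur.reverse = true →
      pv_scan cs false = (pvSplit cs cur).all pv_is_ident) := by
  induction cs with
  | nil =>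
    constructor
    · simp [pv_scan, pvSplit, pv_is_ident]
    · intro cur _ hid; simp [pv_scan, pvSplit, hid]
  | cons c rest ih =>
    have bad : ∀ cur : List Char, cur ≠ [] → pv_is_ident cur.reverse = false →
        (pvSplit rest cur).all pv_is_ident = false := by
      clear ih
      induction rest with
      | nil => intro cur _ hid; simp [pvSplit, hid]
      | cons d r ihr =>
        intro cur hne hid
        by_cases hd : d = '.'
        · simp [pvSplit, hd, hid]
        · simp only [pvSplit, if_neg hd]
          exact ihr (d :: cur) (by simp)
            (by rw [List.reverse_cons, pv_ident_append _ _ (by simpa using hne), hid]; simp)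
    constructor
    · -- flag = true: c must start a part
      by_cases hc : c = '.'
      · simp [pv_scan, hc, pvSplit, pv_is_ident]
      · by_cases hs : PySem.Chars.isalpha c || c = '_'
        · rw [show pv_scan (c :: rest) true = pv_scan rest false by simp [pv_scan, hc, hs]]
          rw [ih.2 [c] (by simp) (by simp [pv_is_ident, hs])]
          simp [pvSplit, hc]
        · rw [show pv_scan (c :: rest) true = false by simp [pv_scan, hc, hs]]
          rw [show pvSplit (c :: rest) [] = pvSplit rest [c] by simp [pvSplit, hc]]
          exact (bad [c] (by simp) (by simp [pv_is_ident, hs])).symm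
    · -- flag = false: inside a valid nonempty part cur
      intro cur hne hid
      by_cases hc : c = '.'
      · rw [show pv_scan (c :: rest) false = pv_scan rest true by simp [pv_scan, hc]]
        simp [pvSplit, hc, hid, ih.1]
      · by_cases hk : PySem.Chars.isalnum c || c = '_'
        · rw [show pv_scan (c :: rest) false = pv_scan rest false by simp [pv_scan, hc, hk]]
          rw [ih.2 (c :: cur) (by simp)
            (by simp [List.reverse_cons, pv_ident_append _ _ (show cur.reverse ≠ [] by simpa using hne), hid, hk])]
          simp [pvSplit, hc]
        · rw [show pv_scan (c :: rest) false = false by simp [pv_scan, hc, hk]]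
          rw [show pvSplit (c :: rest) cur = pvSplit rest (c :: cur) by simp [pvSplit, hc]]
          exact (bad (c :: cur) (by simp)
            (by simp [List.reverse_cons, pv_ident_append _ _ (show cur.reverse ≠ [] by simpa using hne), hk])).symm

-- ===== VERDICT (by name: the statement is the Claim_ definition above) =====
theorem is_dotted_ident_py_spec : Claim_equal_is_dotted_ident_py := by
  intro s _
  show is_dotted_ident_py s = is_dotted_ident_py_alt s
  unfold is_dotted_ident_py is_dotted_ident_py_alt
  rw [pv_splitOn_eq]
  rw [if_neg (by simp [pvSplit_ne_nil s.toList []])]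
  exact ((pv_main s.toList).1).symm
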